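-- pv_equiv track=rewrite | github.com/SnehalRaj/CS396A | UGP_submission_170705/code/symm1.py | symmetricSplit
-- ===== SOURCE A (Python) =====
-- def symmetricSplit(cnt,n): # Split 1 into t parts
--     i=cnt%2
--     if cnt//2==0:
--         return [[0]*cnt]*(n+1)
--     else:
--         split= [ [j]*((cnt//2)*2) for j in range(n+1) ]
--         if i:
--             for j in range(len(split)):
--                 split[j]=[0]+split[j]
--         return split
-- ===== SOURCE B (Python) =====
-- def symmetricSplit(cnt, n):
--     # Build one boolean shape mask (False = fixed zero slot, True = slot holding j),
--     # then instantiate it once per j; no replication operator, no mutation pass.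
--     if n < 0:
--         return []
--     mask = []
--     if cnt % 2:
--         mask.append(False)
--     c = 2
--     while c <= cnt:
--         mask.append(True)
--         mask.append(True)
--         c += 2
--     out = []
--     j = 0
--     while j <= n:
--         out.append([j if b else 0 for b in mask])
--         j += 1
--     return out
-- ===== Notes on version B (the rewrite author's own statement) =====
-- stated objective: alternative
-- what changed: Instead of replicating [j]-lists per branch and mutating them with a second prepend pass, B returns [] early when n < 0 and otherwise builds one boolean shape mask (False = fixed zero slot, True = slot holding j) with a counting while-loop, instantiating that template once per row j, with no branching on cnt//2, no replication operator and no mutation pass.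
import Mathlib
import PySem

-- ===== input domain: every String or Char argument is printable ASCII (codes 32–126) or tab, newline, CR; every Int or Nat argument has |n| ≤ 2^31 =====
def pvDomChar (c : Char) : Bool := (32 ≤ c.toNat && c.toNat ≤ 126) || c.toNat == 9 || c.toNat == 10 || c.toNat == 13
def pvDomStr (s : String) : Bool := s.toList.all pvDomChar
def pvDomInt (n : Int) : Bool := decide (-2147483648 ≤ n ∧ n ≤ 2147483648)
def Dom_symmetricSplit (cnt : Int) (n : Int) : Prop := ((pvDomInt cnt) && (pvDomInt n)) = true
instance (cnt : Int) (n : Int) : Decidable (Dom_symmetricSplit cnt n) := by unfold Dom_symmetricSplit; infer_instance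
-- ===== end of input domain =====

-- B replaces A's replication-and-mutate construction by a shape mask: one boolean
-- template built by a counting loop, instantiated per row (objective: alternative; return value only).


-- ===== PORT A =====
def symmetricSplit (cnt : Int) (n : Int) : List (List Int) :=
  let i := PySem.Int.mod cnt 2
  if PySem.Int.floordiv cnt 2 = 0 then
    PySem.List.pyRepeat [PySem.List.pyRepeat [(0 : Int)] cnt] (n + 1)
  else
    let split := (PySem.List.pyRange 0 (n + 1) 1).map
      (fun j => PySem.List.pyRepeat [j] (PySem.Int.floordiv cnt 2 * 2))
    if i ≠ 0 then
      -- the in-place loop 'for j in range(len(split)): split[j] = [0] + split[j]'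
      split.map (fun s => (0 : Int) :: s)
    else split

-- ===== PORT B =====
-- 'while c <= cnt: mask.append(True); mask.append(True); c += 2'   (tail loop with an
-- accumulator, reversed at exit; fuel only makes it structural: cnt.toNat steps suffice)
def pvMaskLoop (cnt : Int) : Nat → Int → List Bool → List Bool
  | 0, _, acc => acc.reverse
  | fuel + 1, c, acc =>
    if c ≤ cnt then pvMaskLoop cnt fuel (c + 2) (true :: true :: acc) else acc.reverse

-- 'while j <= n: out.append([j if b else 0 for b in mask]); j += 1'
def pvRowsLoop (mask : List Bool) (n : Int) : Nat → Int → List (List Int) → List (List Int)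
  | 0, _, acc => acc.reverse
  | fuel + 1, j, acc =>
    if j ≤ n then pvRowsLoop mask n fuel (j + 1) ((mask.map (fun b => if b then j else 0)) :: acc)
    else acc.reverse

def symmetricSplit_alt (cnt : Int) (n : Int) : List (List Int) :=
  if n < 0 then []   -- 'if n < 0: return []' (no rows requested)
  else
    let mask := (if PySem.Int.mod cnt 2 ≠ 0 then [false] else []) ++ pvMaskLoop cnt cnt.toNat 2 []
    pvRowsLoop mask n (n + 1).toNat 0 []

-- ===== PRECONDITION & SPEC =====
def Spec_symmetricSplit (cnt : Int) (n : Int) (out : List (List Int)) : Prop := out = symmetricSplit_alt cnt n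
instance (cnt : Int) (n : Int) (out : List (List Int)) : Decidable (Spec_symmetricSplit cnt n out) := by unfold Spec_symmetricSplit; infer_instance

-- ===== CLAIM (what is proved, stated in full; the proofs are below) =====
def Claim_equal_symmetricSplit : Prop := ∀ (cnt : Int) (n : Int), Dom_symmetricSplit cnt n → Spec_symmetricSplit cnt n (symmetricSplit cnt n)

-- ===== LEMMAS AND PROOFS =====

theorem pv_mod_two (cnt : Int) : PySem.Int.mod cnt 2 = 0 ∨ PySem.Int.mod cnt 2 = 1 := by
  have h1 := PySem.Int.mod_nonneg cnt (b := 2) (by norm_num)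
  have h2 := PySem.Int.mod_lt cnt (b := 2) (by norm_num)
  omega

-- closed form of the mask-building loop (for sufficient fuel)
theorem pvMaskLoop_eq (cnt : Int) (fuel : Nat) (c : Int) (acc : List Bool)
    (hf : cnt + 2 - c ≤ 2 * (fuel : Int)) :
    pvMaskLoop cnt fuel c acc = acc.reverse ++ List.replicate (2 * ((cnt - c + 2) / 2)).toNat true := by
  induction fuel generalizing c acc with
  | zero =>
      have : (2 * ((cnt - c + 2) / 2)).toNat = 0 := by omega
      simp [pvMaskLoop, this]
  | succ f ih =>
      by_cases h : c ≤ cnt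
      · have hk : (2 * ((cnt - c + 2) / 2)).toNat = (2 * ((cnt - (c + 2) + 2) / 2)).toNat + 2 := by
          omega
        simp only [pvMaskLoop, if_pos h,
          ih (c + 2) (true :: true :: acc) (by push_cast at hf ⊢; omega), hk]
        simp [List.replicate_succ]
      · have : (2 * ((cnt - c + 2) / 2)).toNat = 0 := by omega
        simp [pvMaskLoop, h, this]

-- closed form of the row-emitting loop (for sufficient fuel)
theorem pvRowsLoop_eq (mask : List Bool) (n : Int) (fuel : Nat) (j : Int) (acc : List (List Int))
    (hf : n + 1 - j ≤ (fuel : Int)) :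
    pvRowsLoop mask n fuel j acc =
      acc.reverse ++
        (PySem.List.pyRange j (n + 1) 1).map (fun k => mask.map (fun b => if b then k else 0)) := by
  induction fuel generalizing j acc with
  | zero =>
      rw [PySem.List.pyRange_one_eq_nil (by omega)]
      simp [pvRowsLoop]
  | succ f ih =>
      by_cases h : j ≤ n
      · rw [PySem.List.pyRange_one_cons (by omega)]
        simp only [pvRowsLoop, if_pos h,
          ih (j + 1) _ (by push_cast at hf ⊢; omega)]
        simp
      · rw [PySem.List.pyRange_one_eq_nil (by omega)]
        simp [pvRowsLoop, h]

theorem symmetricSplit_eq (cnt n : Int) : symmetricSplit cnt n = symmetricSplit_alt cnt n := by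
  unfold symmetricSplit symmetricSplit_alt
  by_cases hn : n < 0
  · -- no rows: A's outer list is empty in both of its branches
    simp only [if_pos hn]
    rw [PySem.List.pyRange_one_eq_nil (by omega), PySem.List.pyRepeat_singleton]
    have : (n + 1).toNat = 0 := by omega
    simp [this]
  · simp only [if_neg hn]
    rw [pvRowsLoop_eq _ _ _ _ _ (by omega), pvMaskLoop_eq _ _ _ _ (by omega)]
    simp only [List.reverse_nil, List.nil_append]
    have hfd : PySem.Int.floordiv cnt 2 = cnt / 2 :=
      PySem.Int.floordiv_eq_ediv_of_pos (by norm_num)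
    have hdm := PySem.Int.floordiv_mul_add_mod cnt 2
    by_cases hq : PySem.Int.floordiv cnt 2 = 0
    · -- cnt ∈ {0, 1}
      have hcnt : cnt = 0 ∨ cnt = 1 := by
        rcases pv_mod_two cnt with h | h <;> omega
      simp only [hq, if_pos]
      rcases hcnt with h | h <;> subst h
      · have hm : PySem.Int.mod (0 : Int) 2 = 0 := by rcases pv_mod_two 0 with h | h <;> omega
        simp only [hm]
        rw [PySem.List.pyRepeat_singleton]
        norm_num
      · have hm : PySem.Int.mod (1 : Int) 2 = 1 := by
          rcases pv_mod_two 1 with h | h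
          · have := PySem.Int.floordiv_mul_add_mod (1 : Int) 2
            rw [PySem.Int.floordiv_eq_ediv_of_pos (by norm_num)] at this; omega
          · exact h
        simp only [hm]
        rw [PySem.List.pyRepeat_singleton]
        norm_num
    · simp only [if_neg hq]
      have hlen : (PySem.Int.floordiv cnt 2 * 2).toNat = (2 * ((cnt - 2 + 2) / 2)).toNat := by
        rw [hfd]; omega
      rcases pv_mod_two cnt with h0 | h1
      · simp only [h0]
        norm_num
        intro k _ _
        omega
      · simp only [h1]
        norm_num
        intro k _ _
        omega

-- ===== VERDICT (by name: the statement is the Claim_ definition above) =====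
theorem symmetricSplit_spec : Claim_equal_symmetricSplit := by
  intro cnt n _
  unfold Spec_symmetricSplit
  exact symmetricSplit_eq cnt n
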